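-- pv_equiv track=rewrite | github.com/jc428732/cp1404Practicals | practical04/memberwise_addition.py | memberwise_addition
-- ===== SOURCE A (Python) =====
-- def memberwise_addition(list1, list2):
--     if len(list1) >= len(list2):
--         larger_list = list1
--         smaller_list = list2
--     else:
--         larger_list = list2
--         smaller_list = list1
--     x = 0
--     output_list = []
--     for number in larger_list:
--         try:
--             output_list.append(number + smaller_list[x])
--         except IndexError:
--             output_list.append(number)
--         x += 1
--     return output_list
-- ===== SOURCE B (Python) =====
-- def memberwise_addition(list1, list2):
--     """Zero-pad both lists to the common length, then add pointwise.
--     Since 0 is the additive identity, the padded positions reproduce the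
--     untouched tail; no larger/smaller choice or exception handling needed."""
--     n = max(len(list1), len(list2))
--     padded1 = list1 + [0] * (n - len(list1))
--     padded2 = list2 + [0] * (n - len(list2))
--     return [a + b for a, b in zip(padded1, padded2)]
-- ===== Notes on version B (the rewrite author's own statement) =====
-- stated objective: alternative
-- what changed: Replaced A's larger/smaller selection with an indexed try/except loop by a pad-then-map algorithm: both lists are zero-extended to the common length and added pointwise, exploiting that 0 is the additive identity, so no length comparison, indexing or exception handling remains.
import Mathlib
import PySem

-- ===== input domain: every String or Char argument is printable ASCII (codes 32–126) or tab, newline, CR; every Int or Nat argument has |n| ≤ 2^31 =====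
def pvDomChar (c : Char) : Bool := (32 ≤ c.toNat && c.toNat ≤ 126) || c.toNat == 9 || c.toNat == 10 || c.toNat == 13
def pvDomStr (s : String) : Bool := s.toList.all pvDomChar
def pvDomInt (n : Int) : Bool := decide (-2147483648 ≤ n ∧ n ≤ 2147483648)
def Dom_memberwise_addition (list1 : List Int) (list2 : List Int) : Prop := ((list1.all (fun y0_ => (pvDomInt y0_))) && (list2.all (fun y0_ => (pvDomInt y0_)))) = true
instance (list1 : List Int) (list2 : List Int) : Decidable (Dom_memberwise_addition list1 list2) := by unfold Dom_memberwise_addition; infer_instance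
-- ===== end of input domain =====

-- B replaces A's larger/smaller split + indexed try/except loop by a pad-then-map
-- algorithm: zero-extend both lists to the common length, add pointwise (objective: alternative).

-- ===== PORT A =====
-- Single pass over larger_list keeping (x, output_list); smaller_list[x] via pyGet? (none = IndexError).
def memberwise_addition (list1 : List Int) (list2 : List Int) : List Int :=
  let p := if list1.length ≥ list2.length then (list1, list2) else (list2, list1)
  let larger_list := p.1
  let smaller_list := p.2
  let st := larger_list.foldl (fun (st : Int × List Int) number =>
    match PySem.List.pyGet? smaller_list st.1 with
    | some v => (st.1 + 1, st.2 ++ [number + v])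
    | none   => (st.1 + 1, st.2 ++ [number])) (0, [])
  st.2

-- ===== PORT B =====
-- Zero-pad both lists to the common length, then add pointwise over the zip.
def memberwise_addition_alt (list1 : List Int) (list2 : List Int) : List Int :=
  let n := max list1.length list2.length
  let padded1 := list1 ++ List.replicate (n - list1.length) (0 : Int)
  let padded2 := list2 ++ List.replicate (n - list2.length) (0 : Int)
  (padded1.zip padded2).map (fun ab => ab.1 + ab.2)

-- ===== PRECONDITION & SPEC =====
def Spec_memberwise_addition (list1 : List Int) (list2 : List Int) (out : List Int) : Prop := out = memberwise_addition_alt list1 list2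
instance (list1 : List Int) (list2 : List Int) (out : List Int) : Decidable (Spec_memberwise_addition list1 list2 out) := by unfold Spec_memberwise_addition; infer_instance

-- ===== CLAIM (what is proved, stated in full; the proofs are below) =====
def Claim_equal_memberwise_addition : Prop := ∀ (list1 : List Int) (list2 : List Int), Dom_memberwise_addition list1 list2 → Spec_memberwise_addition list1 list2 (memberwise_addition list1 list2)

-- ===== LEMMAS AND PROOFS =====

-- Once x is past the end of smaller, A's loop just appends the rest of larger.
lemma mw_loop_tail (L : List Int) (S : List Int) (x : Nat) (acc : List Int)
    (hx : S.length ≤ x) :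
    (L.foldl (fun (st : Int × List Int) number =>
      match PySem.List.pyGet? S st.1 with
      | some v => (st.1 + 1, st.2 ++ [number + v])
      | none   => (st.1 + 1, st.2 ++ [number])) ((x : Int), acc)).2 = acc ++ L := by
  induction L generalizing x acc with
  | nil => simp
  | cons n L ih =>
    have hnone : PySem.List.pyGet? S (x : Int) = none := by
      simp [PySem.List.pyGet?_natCast]
      omega
    simp only [List.foldl_cons, hnone]
    have : ((x : Int) + 1) = ((x + 1 : Nat) : Int) := by push_cast; ring
    rw [this, ih (x + 1) (acc ++ [n]) (by omega)]
    simp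

-- A's loop computes acc ++ zip-sum of L with (S.drop x) ++ leftover of L.
lemma mw_loop (L : List Int) (S : List Int) (x : Nat) (acc : List Int) :
    (L.foldl (fun (st : Int × List Int) number =>
      match PySem.List.pyGet? S st.1 with
      | some v => (st.1 + 1, st.2 ++ [number + v])
      | none   => (st.1 + 1, st.2 ++ [number])) ((x : Int), acc)).2 =
    acc ++ ((L.zip (S.drop x)).map (fun ab => ab.1 + ab.2)) ++ L.drop (S.length - x) := by
  induction L generalizing x acc with
  | nil => simp
  | cons n L ih =>
    by_cases h : x < S.length
    · have hget : PySem.List.pyGet? S (x : Int) = some S[x] := by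
        rw [PySem.List.pyGet?_natCast]
        simp [List.getElem?_eq_getElem h]
      simp only [List.foldl_cons, hget]
      have hc : ((x : Int) + 1) = ((x + 1 : Nat) : Int) := by push_cast; ring
      rw [hc, ih (x + 1) (acc ++ [n + S[x]])]
      have hd : S.drop x = S[x] :: S.drop (x + 1) := List.drop_eq_getElem_cons h
      have hlen : S.length - x = (S.length - (x + 1)) + 1 := by omega
      rw [hd, hlen]
      simp only [List.zip_cons_cons, List.map_cons, List.cons_append, List.drop_succ_cons,
        List.append_assoc, List.nil_append]
    · have hx : S.length ≤ x := by omega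
      have hd : S.drop x = [] := List.drop_eq_nil_of_le hx
      have hlen : S.length - x = 0 := by omega
      rw [mw_loop_tail (n :: L) S x acc hx, hd, hlen]
      simp

-- Adding a zero pad on the right reproduces the list.
lemma mw_zip_zeros_right (l : List Int) :
    ((l.zip (List.replicate l.length (0 : Int))).map (fun ab => ab.1 + ab.2)) = l := by
  induction l with
  | nil => simp
  | cons a t ih => simp [List.replicate_succ, ih]

-- Adding a zero pad on the left reproduces the list.
lemma mw_zip_zeros_left (l : List Int) :
    (((List.replicate l.length (0 : Int)).zip l).map (fun ab => ab.1 + ab.2)) = l := by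
  induction l with
  | nil => simp
  | cons a t ih => simp [List.replicate_succ, ih]

-- B's pad-then-map equals zip-sum prefix plus whichever tail remains.
lemma mw_alt_eq (l1 l2 : List Int) :
    memberwise_addition_alt l1 l2 =
    ((l1.zip l2).map (fun ab => ab.1 + ab.2)) ++ l1.drop l2.length ++ l2.drop l1.length := by
  induction l1 generalizing l2 with
  | nil =>
    simpa [memberwise_addition_alt] using mw_zip_zeros_left l2
  | cons a t1 ih =>
    cases l2 with
    | nil =>
      simpa [memberwise_addition_alt] using mw_zip_zeros_right (a :: t1)
    | cons b t2 =>
      have hmax : max (a :: t1).length (b :: t2).length - (a :: t1).length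
          = max t1.length t2.length - t1.length := by simp
      have hmax2 : max (a :: t1).length (b :: t2).length - (b :: t2).length
          = max t1.length t2.length - t2.length := by simp
      have := ih t2
      simp only [memberwise_addition_alt] at this ⊢
      rw [hmax, hmax2]
      simp only [List.cons_append, List.zip_cons_cons, List.map_cons, this,
        List.length_cons, List.drop_succ_cons, List.cons_append, List.append_assoc]

-- zip-sum is symmetric in its arguments because Int addition commutes.
lemma mw_zip_comm (l1 l2 : List Int) :
    ((l1.zip l2).map (fun ab => ab.1 + ab.2)) = ((l2.zip l1).map (fun ab => ab.1 + ab.2)) := by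
  induction l1 generalizing l2 with
  | nil => cases l2 <;> simp
  | cons a t1 ih =>
    cases l2 with
    | nil => simp
    | cons b t2 => simpa [Int.add_comm a b] using ih t2

-- ===== VERDICT (by name: the statement is the Claim_ definition above) =====
theorem memberwise_addition_spec : Claim_equal_memberwise_addition := by
  intro list1 list2 _
  unfold Spec_memberwise_addition memberwise_addition
  dsimp only
  rw [show ((0 : Int)) = ((0 : Nat) : Int) from rfl, mw_loop, mw_alt_eq]
  by_cases h : list1.length ≥ list2.length
  · have h2 : list2.drop list1.length = [] := List.drop_eq_nil_of_le h
    simp [h, h2]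
  · have h1 : list1.drop list2.length = [] := List.drop_eq_nil_of_le (by omega)
    simp [h, h1, mw_zip_comm list1 list2]
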